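-- pv_equiv track=rewrite | github.com/Ace1928/eidosian_forge | archive_forge/src/archive_forge/func__n_k_gray_code.py | _n_k_gray_code
-- ===== SOURCE A (Python) =====
-- def _n_k_gray_code(n, k, start=0):
--     """Iterates over a full n-ary Gray code with k digits.
--
--     Args:
--         n (int): Base of the Gray code. Needs to be greater than one.
--         k (int): Number of digits of the Gray code. Needs to be greater than zero.
--         start (int, optional): Optional start of the Gray code. The generated code
--             will be shorter as the code does not wrap. Defaults to 0.
--     """
--     for i in range(start, n ** k):
--         codeword = [0] * k
--         base_repesentation = []
--         val = i
--         for j in range(k):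
--             base_repesentation.append(val % n)
--             val //= n
--         shift = 0
--         for j in reversed(range(k)):
--             codeword[j] = (base_repesentation[j] + shift) % n
--             shift += n - codeword[j]
--         yield codeword
-- ===== SOURCE B (Python) =====
-- def _n_k_gray_code(n, k, start=0):
--     """Simpler: codeword digit j is the closed-form adjacent difference
--     (b[j] - b[j+1]) % n of the base-n digits, replacing A's reversed
--     in-place pass with a running shift accumulator."""
--     def digits(val, m):
--         if m == 0:
--             return []
--         return [val % n] + digits(val // n, m - 1)
--     for i in range(start, n ** k):
--         b = digits(i, k) + [0]
--         yield [(b[j] - b[j + 1]) % n for j in range(k)]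
-- ===== Notes on version B (the rewrite author's own statement) =====
-- stated objective: simpler
-- what changed: B replaces A's reversed in-place pass with a running shift accumulator by the closed-form identity gray digit j = (b[j] - b[j+1]) mod n of adjacent base-n digits (digits built by a small recursion), yielding a stateless comprehension per codeword.
import Mathlib
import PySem

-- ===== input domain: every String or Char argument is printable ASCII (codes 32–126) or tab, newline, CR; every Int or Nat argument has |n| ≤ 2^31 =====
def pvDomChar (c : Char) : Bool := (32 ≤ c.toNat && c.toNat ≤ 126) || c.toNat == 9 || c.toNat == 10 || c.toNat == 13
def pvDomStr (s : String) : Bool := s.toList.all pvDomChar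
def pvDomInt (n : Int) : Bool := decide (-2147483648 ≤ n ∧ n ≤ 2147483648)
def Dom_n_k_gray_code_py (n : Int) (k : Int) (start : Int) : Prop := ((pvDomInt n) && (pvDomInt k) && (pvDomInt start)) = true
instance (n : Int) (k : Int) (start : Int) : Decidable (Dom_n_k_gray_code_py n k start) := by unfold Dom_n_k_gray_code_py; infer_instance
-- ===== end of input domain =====

-- B replaces A's reversed stateful shift-accumulator pass by the closed-form
-- adjacent-difference formula (b[j] - b[j+1]) % n on the base-n digits (simpler, same cost).

-- ===== PORT A =====
def n_k_gray_code_py (n : Int) (k : Int) (start : Int) : List (List Int) :=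
  (PySem.List.pyRange start (n ^ k.toNat) 1).map (fun i =>
    -- base_repesentation: for j in range(k): append(val % n); val //= n
    let b := ((List.range k.toNat).foldl
      (fun (s : List Int × Int) _ =>
        (s.1 ++ [PySem.Int.mod s.2 n], PySem.Int.floordiv s.2 n)) ([], i)).1
    -- shift pass: for j in reversed(range(k)): codeword[j] = (b[j]+shift)%n; shift += n - codeword[j]
    (((List.range k.toNat).reverse).foldl
      (fun (s : List Int × Int) j =>
        let c := PySem.Int.mod (b.getD j 0 + s.2) n
        (s.1.set j c, s.2 + (n - c))) (List.replicate k.toNat 0, 0)).1)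

-- ===== PORT B =====
-- digits(val, m): [] if m == 0 else [val % n] + digits(val // n, m - 1)
def altDigits (n : Int) (val : Int) : Nat → List Int
  | 0 => []
  | m + 1 => PySem.Int.mod val n :: altDigits n (PySem.Int.floordiv val n) m

def n_k_gray_code_py_alt (n : Int) (k : Int) (start : Int) : List (List Int) :=
  (PySem.List.pyRange start (n ^ k.toNat) 1).map (fun i =>
    let b := altDigits n i k.toNat ++ [0]
    (List.range k.toNat).map (fun j => PySem.Int.mod (b.getD j 0 - b.getD (j + 1) 0) n))

-- ===== PRECONDITION & SPEC =====
-- Pre_ excludes exactly the inputs where A raises: k < 0 (TypeError: range bound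
-- n ** k is a float) and n = 0 with k > 0 and start < 0 (ZeroDivisionError in val % n).
def Pre_n_k_gray_code_py (n : Int) (k : Int) (start : Int) : Prop :=
  0 ≤ k ∧ (n ≠ 0 ∨ k ≤ 0 ∨ 0 ≤ start)
instance (n : Int) (k : Int) (start : Int) : Decidable (Pre_n_k_gray_code_py n k start) := by
  unfold Pre_n_k_gray_code_py; infer_instance

def pvWitness_n_k_gray_code_py : Int × Int × Int := (3, 2, 0)

def Spec_n_k_gray_code_py (n : Int) (k : Int) (start : Int) (out : List (List Int)) : Prop := out = n_k_gray_code_py_alt n k start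
instance (n : Int) (k : Int) (start : Int) (out : List (List Int)) : Decidable (Spec_n_k_gray_code_py n k start out) := by unfold Spec_n_k_gray_code_py; infer_instance

-- ===== CLAIM (what is proved, stated in full; the proofs are below) =====
def Claim_equal_n_k_gray_code_py : Prop := ∀ (n : Int) (k : Int) (start : Int), Dom_n_k_gray_code_py n k start → Pre_n_k_gray_code_py n k start → Spec_n_k_gray_code_py n k start (n_k_gray_code_py n k start)

-- ===== LEMMAS AND PROOFS =====

-- Python mod facts: n divides x - (x % n), and % n respects congruence mod n.
theorem pv_mod_sub_dvd (x n : Int) : n ∣ x - PySem.Int.mod x n := by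
  have h := PySem.Int.floordiv_mul_add_mod x n
  exact ⟨PySem.Int.floordiv x n, by linarith [mul_comm (PySem.Int.floordiv x n) n]⟩

theorem pv_mod_congr (n x y : Int) (hn : n ≠ 0) (h : n ∣ x - y) :
    PySem.Int.mod x n = PySem.Int.mod y n := by
  have hd : n ∣ PySem.Int.mod x n - PySem.Int.mod y n := by
    have h1 := pv_mod_sub_dvd x n
    have h2 := pv_mod_sub_dvd y n
    have : PySem.Int.mod x n - PySem.Int.mod y n = (y - PySem.Int.mod y n) - (x - PySem.Int.mod x n) + (x - y) := by ring
    rw [this]; exact dvd_add (dvd_sub h2 h1) h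
  have habs : |PySem.Int.mod x n - PySem.Int.mod y n| < |n| := by
    rcases lt_or_gt_of_ne hn with hneg | hpos
    · have b1 := PySem.Int.mod_neg_bounds x hneg
      have b2 := PySem.Int.mod_neg_bounds y hneg
      rw [abs_lt, abs_of_neg hneg]; omega
    · have b1 := PySem.Int.mod_nonneg x hpos
      have b2 := PySem.Int.mod_nonneg y hpos
      have c1 := PySem.Int.mod_lt x hpos
      have c2 := PySem.Int.mod_lt y hpos
      rw [abs_lt, abs_of_pos hpos]; omega
  have := Int.eq_zero_of_abs_lt_dvd ((abs_dvd n _).mpr hd) habs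
  omega

theorem altDigits_length (n v : Int) (m : Nat) : (altDigits n v m).length = m := by
  induction m generalizing v with
  | zero => rfl
  | succ m ih => simp [altDigits, ih]

-- A's repeated-division fold builds exactly altDigits (plus the iterated quotient).
theorem baseRep_fold (n : Int) (m : Nat) :
    ∀ (acc : List Int) (v : Int),
    ((List.range m).foldl
      (fun (s : List Int × Int) _ =>
        (s.1 ++ [PySem.Int.mod s.2 n], PySem.Int.floordiv s.2 n)) (acc, v))
    = (acc ++ altDigits n v m, (fun w => PySem.Int.floordiv w n)^[m] v) := by
  induction m with
  | zero => intro acc v; simp [altDigits]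
  | succ m ih =>
    intro acc v
    rw [List.range_succ_eq_map]
    simp only [List.foldl_cons, List.foldl_map]
    rw [ih]
    simp [altDigits, Function.iterate_succ_apply]

-- getD into b ++ [0] agrees with getD into b (default 0) for j ≤ length b
theorem getD_append_zero (b : List Int) (j : Nat) (hj : j ≤ b.length) :
    (b ++ [0]).getD j 0 = b.getD j 0 := by
  rcases lt_or_eq_of_le hj with h | h
  · rw [List.getD_append _ _ _ _ h]
  · subst h
    rw [List.getD_eq_default _ _ (le_refl _)]
    rw [List.getD_eq_getElem?_getD]
    simp

-- The reversed shift-accumulator pass computes the adjacent-difference closed form.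
theorem shift_pass (n : Int) (hn : n ≠ 0) (b : List Int) (K : Nat) (hb : b.length = K) :
    ∀ (j : Nat), j ≤ K → ∀ (cw : List Int) (s : Int), cw.length = K →
    n ∣ (s + b.getD j 0) →
    (((List.range j).reverse.foldl
      (fun (st : List Int × Int) j =>
        let c := PySem.Int.mod (b.getD j 0 + st.2) n
        (st.1.set j c, st.2 + (n - c))) (cw, s)).1)
    = (List.range K).map (fun m =>
        if m < j then PySem.Int.mod (b.getD m 0 - b.getD (m + 1) 0) n else cw.getD m 0) := by
  intro j
  induction j with
  | zero =>
    intro _ cw s hcw _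
    simp only [List.range_zero, List.reverse_nil, List.foldl_nil]
    symm
    apply List.ext_getElem
    · simp [hcw]
    · intro m h1 h2
      simp only [List.getElem_map, List.getElem_range]
      rw [if_neg (Nat.not_lt_zero m), List.getD_eq_getElem _ _ (by simp [hcw] at h1 ⊢; omega)]
  | succ j ih =>
    intro hj cw s hcw hdvd
    rw [List.range_succ, List.reverse_append]
    simp only [List.reverse_singleton, List.singleton_append, List.foldl_cons]
    have hc : PySem.Int.mod (b.getD j 0 + s) n
        = PySem.Int.mod (b.getD j 0 - b.getD (j + 1) 0) n := by
      apply pv_mod_congr n _ _ hn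
      have : (b.getD j 0 + s) - (b.getD j 0 - b.getD (j + 1) 0) = s + b.getD (j + 1) 0 := by ring
      rw [this]; exact hdvd
    rw [ih (by omega) _ _ (by simp [hcw]) ?_]
    · apply List.map_congr_left
      intro m hm
      rw [List.mem_range] at hm
      by_cases h1 : m < j
      · simp [h1, Nat.lt_succ_of_lt h1]
      · by_cases h2 : m = j
        · subst h2
          rw [if_neg (lt_irrefl m), if_pos (Nat.lt_succ_self m)]
          rw [List.getD_eq_getElem _ _ (by simp only [List.length_set]; omega)]
          rw [List.getElem_set_self]
          exact hc
        · have h3 : ¬ m < j + 1 := by omega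
          simp only [if_neg h1, if_neg h3]
          rw [List.getD_eq_getElem _ _ (by simp only [List.length_set]; omega),
              List.getD_eq_getElem _ _ (by omega)]
          rw [List.getElem_set_ne (by omega)]
          rw [List.getD_eq_getElem _ _ (by omega)]
    · -- invariant for j: n ∣ (s + (n - c)) + b.getD j 0
      have hd2 := pv_mod_sub_dvd (b.getD j 0 + s) n
      have : s + (n - PySem.Int.mod (b.getD j 0 + s) n) + b.getD j 0
          = ((b.getD j 0 + s) - PySem.Int.mod (b.getD j 0 + s) n) + n := by ring
      rw [this]
      exact dvd_add hd2 (dvd_refl n)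

-- pointwise: for every i the two codeword computations agree (n ≠ 0)
theorem body_eq (n : Int) (hn : n ≠ 0) (K : Nat) (i : Int) :
    (((List.range K).reverse.foldl
      (fun (st : List Int × Int) j =>
        let c := PySem.Int.mod ((((List.range K).foldl
          (fun (s : List Int × Int) _ =>
            (s.1 ++ [PySem.Int.mod s.2 n], PySem.Int.floordiv s.2 n)) ([], i)).1).getD j 0 + st.2) n
        (st.1.set j c, st.2 + (n - c))) (List.replicate K 0, 0)).1)
    = (List.range K).map (fun j =>
        PySem.Int.mod ((altDigits n i K ++ [0]).getD j 0 - (altDigits n i K ++ [0]).getD (j + 1) 0) n) := by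
  have hbase : (((List.range K).foldl
      (fun (s : List Int × Int) _ =>
        (s.1 ++ [PySem.Int.mod s.2 n], PySem.Int.floordiv s.2 n)) ([], i)).1) = altDigits n i K := by
    rw [baseRep_fold]; simp
  rw [show (fun (st : List Int × Int) j =>
        let c := PySem.Int.mod ((((List.range K).foldl
          (fun (s : List Int × Int) _ =>
            (s.1 ++ [PySem.Int.mod s.2 n], PySem.Int.floordiv s.2 n)) ([], i)).1).getD j 0 + st.2) n
        (st.1.set j c, st.2 + (n - c)))
      = (fun (st : List Int × Int) j =>
        let c := PySem.Int.mod ((altDigits n i K).getD j 0 + st.2) n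
        (st.1.set j c, st.2 + (n - c))) from by rw [hbase]]
  have hlen := altDigits_length n i K
  rw [shift_pass n hn (altDigits n i K) K hlen K (le_refl K) (List.replicate K 0) 0
      (by simp) (by rw [List.getD_eq_default _ _ (by omega)]; simp)]
  apply List.map_congr_left
  intro m hm
  rw [List.mem_range] at hm
  rw [if_pos hm, getD_append_zero _ _ (by omega), getD_append_zero _ _ (by omega)]

theorem n_k_gray_code_py_spec : Claim_equal_n_k_gray_code_py := by
  intro n k start _ hpre
  unfold Spec_n_k_gray_code_py n_k_gray_code_py n_k_gray_code_py_alt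
  obtain ⟨hk, hcase⟩ := hpre
  by_cases hn : n = 0
  · subst hn
    rcases hcase with h | h | h
    · exact absurd rfl h
    · have hk0 : k.toNat = 0 := by omega
      simp [hk0]
    · by_cases hk0 : k.toNat = 0
      · simp [hk0]
      · have : (0 : Int) ^ k.toNat = 0 := by
          exact zero_pow hk0
        rw [this, PySem.List.pyRange_one_eq_nil (by omega)]
        simp
  · apply List.map_congr_left
    intro i _
    exact body_eq n hn k.toNat i
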